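-- pv_equiv track=rewrite | github.com/aaa2ppp/ya-algo-training8-pub | less4/i/main.py | solve
-- ===== SOURCE A (Python) =====
-- from typing import List, Tuple
--
-- def calc_squares(d: int) -> List[int]:
--     """Возвращает список всех квадратов (начиная с 0), <= d, в порядке возрастания."""
--     q = []
--     i = 0
--     while i * i <= d:
--         q.append(i * i)
--         i += 1
--     return q
--
-- def calc_square_sums(d: int) -> List[Tuple[int, int]]:
--     """
--     Возвращает список пар (a, b), таких что a^2 + b^2 == d и a <= b.
--     Здесь a и b — целые неотрицательные числа (корни, не квадраты!).
--     """
--     q = calc_squares(d)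
--     qs = []
--     i, j = 0, len(q) - 1
--     while i <= j:
--         c = q[i] + q[j]
--         if c < d:
--             i += 1
--         elif c > d:
--             j -= 1
--         else:
--             # q[i] = i*i, q[j] = j*j → пара (i, j)
--             qs.append((i, j))
--             j -= 1
--     return qs
--
-- def calc_offsets(d: int) -> List[Tuple[int, int]]:
--     """Возвращает все целочисленные смещения (dx, dy), такие что dx^2 + dy^2 == d."""
--     pairs = calc_square_sums(d)
--     offsets = []
--     for a, b in pairs:
--         if a == 0:
--             # (0, ±b), (±b, 0)
--             offsets.extend([(0, b), (0, -b), (b, 0), (-b, 0)])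
--         elif a == b:
--             # (±a, ±a) — 4 варианта
--             offsets.extend([(a, a), (a, -a), (-a, -a), (-a, a)])
--         else:
--             # Все комбинации знаков и перестановок — 8 штук
--             offsets.extend([
--                 (a, b), (a, -b), (-a, -b), (-a, b),
--                 (b, a), (b, -a), (-b, -a), (-b, a)
--             ])
--     return offsets
--
-- def solve(d, forest) -> int:
--     """
--     Считает количество неориентированных пар деревьев, расстояние между которыми в квадрате равно d.
--     Поддерживает дубликаты (много деревьев в одной точке).
--     """
--     offsets = calc_offsets(d)
--     if not offsets:
--         return 0
--
--     count = 0
--     for x, y in forest.keys():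
--         for dx, dy in offsets:
--             nx, ny = x + dx, y + dy
--             if (nx, ny) in forest:
--                 count += forest[(nx, ny)]
--
--     return count // 2
-- ===== SOURCE B (Python) =====
-- def solve(d, forest) -> int:
--     """
--     Counts unordered pairs of trees at squared distance d.
--     Finds representations d = a^2 + b^2 (a <= b) by a direct trial loop with an
--     integer Newton square root, instead of precomputing all squares and running
--     a two-pointer scan over them.
--     """
--     def isqrt(n):
--         # Newton's method for the integer square root (n >= 0).
--         if n == 0:
--             return 0
--         x = n
--         y = (x + n // x) // 2
--         while y < x:
--             x = y
--             y = (x + n // x) // 2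
--         return x
--
--     pairs = []
--     a = 0
--     while 2 * a * a <= d:
--         rem = d - a * a
--         b = isqrt(rem)
--         if b * b == rem:
--             pairs.append((a, b))
--         a += 1
--
--     offsets = []
--     for a, b in pairs:
--         if a == 0:
--             offsets.extend([(0, b), (0, -b), (b, 0), (-b, 0)])
--         elif a == b:
--             offsets.extend([(a, a), (a, -a), (-a, -a), (-a, a)])
--         else:
--             offsets.extend([
--                 (a, b), (a, -b), (-a, -b), (-a, b),
--                 (b, a), (b, -a), (-b, -a), (-b, a)
--             ])
--
--     count = 0
--     for x, y in forest.keys():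
--         for dx, dy in offsets:
--             count += forest.get((x + dx, y + dy), 0)
--
--     return count // 2
-- ===== Notes on version B (the rewrite author's own statement) =====
-- stated objective: alternative
-- what changed: The representation-finding step (all (a,b) with a^2+b^2=d, a<=b) is replaced: instead of precomputing the list of all squares <= d and running a two-pointer scan over it, B runs a direct trial loop over a while 2a^2<=d, computing b with a hand-written integer Newton square root and keeping (a,b) when b^2 = d-a^2; the sign expansion is kept and the per-point counting loop uses dict.get with a default instead of a membership test plus lookup and drops the empty-offsets early return.
import Mathlib
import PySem

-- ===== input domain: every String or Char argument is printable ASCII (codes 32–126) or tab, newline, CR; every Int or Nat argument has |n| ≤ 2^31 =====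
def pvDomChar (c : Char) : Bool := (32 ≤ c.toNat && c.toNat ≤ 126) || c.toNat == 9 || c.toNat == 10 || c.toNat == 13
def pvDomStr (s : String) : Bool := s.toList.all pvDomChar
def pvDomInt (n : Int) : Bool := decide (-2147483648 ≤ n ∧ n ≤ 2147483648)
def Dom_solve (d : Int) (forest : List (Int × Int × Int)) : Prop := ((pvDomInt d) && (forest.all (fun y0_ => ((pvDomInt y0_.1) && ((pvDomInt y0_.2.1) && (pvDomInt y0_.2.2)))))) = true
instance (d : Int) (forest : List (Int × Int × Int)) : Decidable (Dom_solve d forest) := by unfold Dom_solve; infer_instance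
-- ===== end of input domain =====

-- B finds the representations d = a² + b² (a ≤ b) by a direct trial loop with a
-- hand-written integer Newton square root instead of A's squares-list + two-pointer
-- scan, and accumulates counts with a defaulted lookup (objective: alternative).


-- shared input marshalling: the Python dict argument as a PySem.Dict (insertion order, overwrite)
def buildForest (forest : List (Int × Int × Int)) : PySem.Dict (Int × Int) Int :=
  forest.foldl (fun fd t => fd.insert (t.1, t.2.1) t.2.2) PySem.Dict.empty

-- shared sign expansion (identical code in Source A's calc_offsets and in Source B's expansion loop)
def expandPair (acc : List (Int × Int)) (p : Int × Int) : List (Int × Int) :=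
  if p.1 = 0 then acc ++ [(0, p.2), (0, -p.2), (p.2, 0), (-p.2, 0)]
  else if p.1 = p.2 then acc ++ [(p.1, p.1), (p.1, -p.1), (-p.1, -p.1), (-p.1, p.1)]
  else acc ++ [(p.1, p.2), (p.1, -p.2), (-p.1, -p.2), (-p.1, p.2),
               (p.2, p.1), (p.2, -p.1), (-p.2, -p.1), (-p.2, p.1)]

-- ===== PORT A =====
-- calc_squares: while i * i <= d: q.append(i * i); i += 1
-- (the fuel only makes the loop total: i*i ≤ d forces i ≤ d, so (d+1).toNat steps from i = 0 always suffice)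
def calcSquaresAux (d : Int) : Nat → Int → List Int
  | 0, _ => []
  | fuel + 1, i => if i * i ≤ d then i * i :: calcSquaresAux d fuel (i + 1) else []

def calcSquares (d : Int) : List Int := calcSquaresAux d (d + 1).toNat 0

-- the two-pointer loop of calc_square_sums; q[i] is read with pyGet?/getD 0
-- (whenever the loop runs, the indices are provably in range: see calcSquares_get below;
--  j + 1 - i shrinks by 1 each iteration, so fuel = len(q) suffices)
def aPairsAux (d : Int) (q : List Int) : Nat → Int → Int → List (Int × Int) → List (Int × Int)
  | 0, _, _, acc => acc
  | fuel + 1, i, j, acc =>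
    if i ≤ j then
      let c := (PySem.List.pyGet? q i).getD 0 + (PySem.List.pyGet? q j).getD 0
      if c < d then aPairsAux d q fuel (i + 1) j acc
      else if c > d then aPairsAux d q fuel i (j - 1) acc
      else aPairsAux d q fuel i (j - 1) (acc ++ [(i, j)])
    else acc

def calcSquareSums (d : Int) : List (Int × Int) :=
  let q := calcSquares d
  aPairsAux d q q.length 0 ((q.length : Int) - 1) []

def calcOffsets (d : Int) : List (Int × Int) :=
  (calcSquareSums d).foldl expandPair []

-- for (x,y) in forest.keys(): for (dx,dy) in offsets: if (nx,ny) in forest: count += forest[(nx,ny)]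
def countLoopA (fd : PySem.Dict (Int × Int) Int) (offsets : List (Int × Int)) : Int :=
  (PySem.Dict.keys fd).foldl
    (fun count k => offsets.foldl
      (fun count o =>
        match fd.get? (k.1 + o.1, k.2 + o.2) with
        | some v => count + v
        | none => count) count) 0

def solve (d : Int) (forest : List (Int × Int × Int)) : Int :=
  let offsets := calcOffsets d
  if offsets = [] then 0
  else PySem.Int.floordiv (countLoopA (buildForest forest) offsets) 2

-- ===== PORT B =====
-- Newton's iteration: x = n; y = (x + n//x)//2; while y < x: x = y; y = (x + n//x)//2
-- (the fuel only makes the loop total; x strictly decreases and stays ≥ 1, so n.toNat steps suffice)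
def newtonLoop (n : Int) : Nat → Int → Int
  | 0, x => x
  | fuel + 1, x =>
    let y := PySem.Int.floordiv (x + PySem.Int.floordiv n x) 2
    if y < x then newtonLoop n fuel y else x

def pyIsqrt (n : Int) : Int :=
  if n = 0 then 0 else newtonLoop n n.toNat n

-- a = 0; while 2*a*a <= d: rem = d - a*a; b = isqrt(rem); if b*b == rem: pairs.append((a, b)); a += 1
-- (the fuel only makes the loop total: 2*a*a ≤ d forces a ≤ d, so (d+1).toNat steps from a = 0 suffice)
def bPairsAux (d : Int) : Nat → Int → List (Int × Int)
  | 0, _ => []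
  | fuel + 1, a =>
    if 2 * a * a ≤ d then
      let rem := d - a * a
      let b := pyIsqrt rem
      if b * b = rem then (a, b) :: bPairsAux d fuel (a + 1) else bPairsAux d fuel (a + 1)
    else []

-- for (x,y) in forest.keys(): for (dx,dy) in offsets: count += forest.get((nx,ny), 0)
def countLoopB (fd : PySem.Dict (Int × Int) Int) (offsets : List (Int × Int)) : Int :=
  (PySem.Dict.keys fd).foldl
    (fun count k => offsets.foldl
      (fun count o => count + fd.getD (k.1 + o.1, k.2 + o.2) 0) count) 0

def solve_alt (d : Int) (forest : List (Int × Int × Int)) : Int :=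
  let offsets := (bPairsAux d (d + 1).toNat 0).foldl expandPair []
  PySem.Int.floordiv (countLoopB (buildForest forest) offsets) 2

-- ===== PRECONDITION & SPEC =====
def Spec_solve (d : Int) (forest : List (Int × Int × Int)) (out : Int) : Prop := out = solve_alt d forest
instance (d : Int) (forest : List (Int × Int × Int)) (out : Int) : Decidable (Spec_solve d forest out) := by unfold Spec_solve; infer_instance

-- ===== CLAIM (what is proved, stated in full; the proofs are below) =====
def Claim_equal_solve : Prop := ∀ (d : Int) (forest : List (Int × Int × Int)), Dom_solve d forest → Spec_solve d forest (solve d forest)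

-- ===== LEMMAS AND PROOFS =====

theorem pv_sq_le (i d : Int) (h : i * i ≤ d) : i ≤ d :=
  le_trans (by nlinarith [sq_nonneg (i - 1)]) h

theorem pv_two_sq_le (a d : Int) (h : 2 * a * a ≤ d) : a ≤ d := by
  nlinarith [sq_nonneg (a - 1), sq_nonneg a]

-- Newton's iteration keeps x a strict upper approximation of √n and lands on ⌊√n⌋.
theorem newtonLoop_spec (n : Int) (hn : 1 ≤ n) :
    ∀ (fuel : Nat) (x : Int), 1 ≤ x → x.toNat ≤ fuel → n < (x + 1) * (x + 1) →
      1 ≤ newtonLoop n fuel x ∧ newtonLoop n fuel x * newtonLoop n fuel x ≤ n ∧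
        n < (newtonLoop n fuel x + 1) * (newtonLoop n fuel x + 1) := by
  intro fuel
  induction fuel with
  | zero => intro x hx hf _; omega
  | succ fuel ih =>
    intro x hx hf hub
    have hxpos : (0:Int) < x := by omega
    have h2 : (0:Int) < 2 := by omega
    rw [newtonLoop]
    simp only [PySem.Int.floordiv_eq_ediv_of_pos hxpos, PySem.Int.floordiv_eq_ediv_of_pos h2]
    set q := n / x with hq
    set y := (x + q) / 2 with hy
    have hnqr := Int.ediv_add_emod n x
    have hr0 : 0 ≤ n % x := Int.emod_nonneg n (by omega)
    have hr1 : n % x < x := Int.emod_lt_of_pos n hxpos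
    have hys := Int.ediv_add_emod (x + q) 2
    have hs0 : 0 ≤ (x + q) % 2 := Int.emod_nonneg _ (by omega)
    have hs1 : (x + q) % 2 < 2 := Int.emod_lt_of_pos _ h2
    have hq0 : 0 ≤ q := Int.ediv_nonneg (by omega) (by omega)
    by_cases hlt : y < x
    · rw [if_pos hlt]
      have hy1 : 1 ≤ y := by
        rcases eq_or_lt_of_le hx with h1 | h1
        · have : q = n := by rw [hq, ← h1]; simp
          omega
        · omega
      have hyub : n < (y + 1) * (y + 1) := by
        nlinarith [sq_nonneg (x - q - 1), sq_nonneg (x + q + 1 - (2*y + 2))]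
      exact ih y hy1 (by omega) hyub
    · rw [if_neg hlt]
      refine ⟨hx, ?_, hub⟩
      have hxq : x ≤ q := by omega
      nlinarith

theorem pyIsqrt_spec (n : Int) (hn : 0 ≤ n) :
    0 ≤ pyIsqrt n ∧ pyIsqrt n * pyIsqrt n ≤ n ∧ n < (pyIsqrt n + 1) * (pyIsqrt n + 1) := by
  unfold pyIsqrt
  by_cases h : n = 0
  · simp [h]
  · rw [if_neg h]
    have h1 : 1 ≤ n := by omega
    have := newtonLoop_spec n h1 n.toNat n h1 (le_refl _) (by nlinarith)
    exact ⟨by omega, this.2.1, this.2.2⟩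

theorem pyIsqrt_sq (j : Int) (hj : 0 ≤ j) : pyIsqrt (j * j) = j := by
  obtain ⟨h0, h1, h2⟩ := pyIsqrt_spec (j * j) (by positivity)
  nlinarith

-- one unfolding of B's trial loop when a valid pair with first component a exists
theorem bPairsAux_cons (d a b : Int) (fuel : Nat) (ha : 0 ≤ a) (hab : a ≤ b)
    (hsum : a * a + b * b = d) :
    bPairsAux d (fuel + 1) a = (a, b) :: bPairsAux d fuel (a + 1) := by
  have hb : 0 ≤ b := le_trans ha hab
  have hg : 2 * a * a ≤ d := by nlinarith
  have hrem : d - a * a = b * b := by omega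
  rw [bPairsAux, if_pos hg]
  simp [hrem, pyIsqrt_sq b hb]

-- the loop stops at once when the guard fails (whatever the fuel)
theorem bPairsAux_zero (d a : Int) (fuel : Nat) (hg : ¬ 2 * a * a ≤ d) :
    bPairsAux d fuel a = [] := by
  cases fuel with
  | zero => rfl
  | succ fuel => rw [bPairsAux, if_neg hg]

-- the trial loop emits nothing when every valid pair starts below a
theorem bPairsAux_nil (d : Int) :
    ∀ (fuel : Nat) (a : Int), 0 ≤ a →
      (∀ x b, 0 ≤ x → x ≤ b → x * x + b * b = d → x < a) → bPairsAux d fuel a = [] := by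
  intro fuel
  induction fuel with
  | zero => intro a _ _; rfl
  | succ fuel ih =>
    intro a ha hno
    by_cases hg : 2 * a * a ≤ d
    · rw [bPairsAux, if_pos hg]
      have hrem : 0 ≤ d - a * a := by nlinarith
      obtain ⟨h0, h1, h2⟩ := pyIsqrt_spec (d - a * a) hrem
      have hne : pyIsqrt (d - a * a) * pyIsqrt (d - a * a) ≠ d - a * a := by
        intro he
        exact absurd (hno a (pyIsqrt (d - a * a)) ha (by nlinarith) (by omega)) (lt_irrefl a)
      simp only [if_neg hne]
      exact ih (a + 1) (by omega) (fun x b hx hxb hs => by have := hno x b hx hxb hs; omega)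
    · exact bPairsAux_zero d a _ hg

-- stepping the trial loop at its canonical fuel when no valid pair starts at a
theorem bPairsAux_step (d a : Int) (ha : 0 ≤ a)
    (hno : ∀ b, 0 ≤ b → a ≤ b → a * a + b * b ≠ d) :
    bPairsAux d (d + 1 - a).toNat a = bPairsAux d (d + 1 - (a + 1)).toNat (a + 1) := by
  by_cases hg : 2 * a * a ≤ d
  · have had : a ≤ d := pv_two_sq_le a d hg
    have hf : (d + 1 - a).toNat = (d + 1 - (a + 1)).toNat + 1 := by omega
    rw [hf, bPairsAux, if_pos hg]
    have hrem : 0 ≤ d - a * a := by nlinarith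
    obtain ⟨h0, h1, h2⟩ := pyIsqrt_spec (d - a * a) hrem
    have hne : pyIsqrt (d - a * a) * pyIsqrt (d - a * a) ≠ d - a * a := by
      intro he
      exact hno (pyIsqrt (d - a * a)) h0 (by nlinarith) (by omega)
    simp only [if_neg hne]
  · rw [bPairsAux_zero d a _ hg,
      bPairsAux_zero d (a + 1) _ (by intro hc; exact hg (by nlinarith))]

theorem calcSquaresAux_get (d : Int) :
    ∀ (fuel : Nat) (i k : Int), (d + 1 - i).toNat ≤ fuel → 0 ≤ i → i ≤ k → k * k ≤ d →
      PySem.List.pyGet? (calcSquaresAux d fuel i) (k - i) = some (k * k) := by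
  intro fuel
  induction fuel with
  | zero =>
    intro i k hf hi hik hk
    exfalso
    have := pv_sq_le k d hk
    omega
  | succ fuel ih =>
    intro i k hf hi hik hk
    have h1 : i * i ≤ d := by nlinarith
    have hid : i ≤ d := pv_sq_le i d h1
    rw [calcSquaresAux, if_pos h1]
    rcases eq_or_lt_of_le hik with he | hlt
    · rw [← he]
      simp
    · have hcast : k - i = ((k - (i+1)).toNat : Int) + 1 := by omega
      rw [hcast, PySem.List.pyGet?_cons_succ]
      have := ih (i + 1) k (by omega) (by omega) (by omega) hk
      rw [show ((k - (i+1)).toNat : Int) = k - (i + 1) by omega]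
      exact this

theorem calcSquares_get (d k : Int) (hk : 0 ≤ k) (hkd : k * k ≤ d) :
    (PySem.List.pyGet? (calcSquares d) k).getD 0 = k * k := by
  have h := calcSquaresAux_get d (d + 1).toNat 0 k (by omega) (le_refl 0) hk hkd
  have h2 : PySem.List.pyGet? (calcSquaresAux d (d + 1).toNat 0) k = some (k * k) := by
    simpa using h
  simp only [calcSquares]
  rw [h2]
  rfl

theorem calcSquaresAux_len (d m : Int) (hm : 0 ≤ m) (hm1 : m * m ≤ d) (hm2 : d < (m+1)*(m+1)) :
    ∀ (fuel : Nat) (i : Int), (d + 1 - i).toNat ≤ fuel → 0 ≤ i → i ≤ m + 1 →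
      ((calcSquaresAux d fuel i).length : Int) = m + 1 - i := by
  intro fuel
  induction fuel with
  | zero =>
    intro i hf hi him
    have hmm : m ≤ m * m := by nlinarith
    have : i = m + 1 := by omega
    simp [calcSquaresAux, this]
  | succ fuel ih =>
    intro i hf hi him
    rcases eq_or_lt_of_le him with he | hlt
    · rw [calcSquaresAux, if_neg (by rw [he]; omega)]
      simp [he]
    · have h1 : i * i ≤ d := by nlinarith
      have hid : i ≤ d := pv_sq_le i d h1
      rw [calcSquaresAux, if_pos h1]
      have := ih (i + 1) (by omega) (by omega) (by omega)
      simp only [List.length_cons]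
      push_cast
      omega

-- the two-pointer scan emits exactly the pairs B's trial loop emits, in the same order
theorem tp (d m : Int) (hm : 0 ≤ m) (hm1 : m * m ≤ d) :
    ∀ (fuel : Nat) (i j : Int) (acc : List (Int × Int)), (j + 1 - i).toNat ≤ fuel → 0 ≤ i → j ≤ m →
      (∀ a b, 0 ≤ a → a ≤ b → a * a + b * b = d → (i ≤ a ↔ b ≤ j)) →
      aPairsAux d (calcSquares d) fuel i j acc = acc ++ bPairsAux d (d + 1 - i).toNat i := by
  intro fuel
  induction fuel using Nat.strong_induction_on with
  | _ fuel ih =>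
    intro i j acc hk hi hjm H
    have hnil_of_out : (¬ i ≤ j) →
        acc = acc ++ bPairsAux d (d + 1 - i).toNat i := by
      intro hij
      rw [bPairsAux_nil d (d + 1 - i).toNat i hi ?_]
      · simp
      · intro x b hx hxb hs
        by_contra hc
        push_neg at hc
        have := (H x b hx hxb hs).mp hc
        omega
    cases fuel with
    | zero =>
      exact hnil_of_out (by omega)
    | succ fuel =>
      by_cases hij : i ≤ j
      · have hj0 : 0 ≤ j := by omega
        have hjj : j * j ≤ d := by nlinarith
        have hii : i * i ≤ d := by nlinarith
        rw [aPairsAux, if_pos hij]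
        simp only [calcSquares_get d i hi hii, calcSquares_get d j hj0 hjj]
        by_cases h1 : i * i + j * j < d
        · rw [if_pos h1]
          have hno : ∀ b, 0 ≤ b → i ≤ b → i * i + b * b ≠ d := by
            intro b hb hib hs
            have hbj : b ≤ j := (H i b hi hib hs).mp (le_refl i)
            nlinarith
          rw [bPairsAux_step d i hi hno]
          apply ih fuel (by omega) (i + 1) j acc (by omega) (by omega) hjm
          intro a b ha hab hs
          constructor
          · intro h; exact (H a b ha hab hs).mp (by omega)
          · intro h
            have hia := (H a b ha hab hs).mpr h
            rcases eq_or_lt_of_le hia with he | hlt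
            · exact absurd hs (by rw [← he] at hs ⊢; exact hno b (le_trans ha hab) (by omega))
            · omega
        · rw [if_neg h1]
          by_cases h2 : i * i + j * j > d
          · rw [if_pos h2]
            have hnoj : ∀ a, 0 ≤ a → a ≤ j → a * a + j * j ≠ d := by
              intro a ha haj hs
              have hia := (H a j ha haj hs).mpr (le_refl j)
              nlinarith
            apply ih fuel (by omega) i (j - 1) acc (by omega) hi (by omega)
            intro a b ha hab hs
            constructor
            · intro h
              have hbj := (H a b ha hab hs).mp h
              rcases eq_or_lt_of_le hbj with he | hlt
              · exact absurd hs (by rw [he]; exact hnoj a ha (by omega))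
              · omega
            · intro h; exact (H a b ha hab hs).mpr (by omega)
          · rw [if_neg h2]
            have hd : i * i + j * j = d := by omega
            have huniq : ∀ a b, 0 ≤ a → a ≤ b → a * a + b * b = d → (a = i ↔ b = j) := by
              intro a b ha hab hs
              constructor
              · intro he; subst he; nlinarith
              · intro he; subst he; nlinarith
            have hid : i ≤ d := pv_sq_le i d hii
            have hfi : (d + 1 - i).toNat = (d + 1 - (i + 1)).toNat + 1 := by omega
            have hB : bPairsAux d (d + 1 - i).toNat i
                = (i, j) :: bPairsAux d (d + 1 - (i + 1)).toNat (i + 1) := by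
              rw [hfi]
              exact bPairsAux_cons d i j _ hi hij hd
            by_cases hij2 : i ≤ j - 1
            · cases fuel with
              | zero => omega
              | succ fuel' =>
                rw [aPairsAux, if_pos hij2]
                have hj1 : (0:Int) ≤ j - 1 := by omega
                have hj1d : (j - 1) * (j - 1) ≤ d := by nlinarith
                simp only [calcSquares_get d i hi hii, calcSquares_get d (j-1) hj1 hj1d]
                have hc' : i * i + (j - 1) * (j - 1) < d := by nlinarith
                rw [if_pos hc']
                have hrec := ih fuel' (by omega) (i + 1) (j - 1) (acc ++ [(i, j)])
                  (by omega) (by omega) (by omega) ?_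
                · rw [hrec, hB]
                  simp
                · intro a b ha hab hs
                  have h3 := H a b ha hab hs
                  have h4 := huniq a b ha hab hs
                  constructor
                  · intro h; have : a ≠ i := by omega
                    have : b ≠ j := fun hb => this (h4.mpr hb)
                    have := h3.mp (by omega)
                    omega
                  · intro h; have : b ≠ j := by omega
                    have : a ≠ i := fun hb => this (h4.mp hb)
                    have := h3.mpr (by omega)
                    omega
            · have hstop : aPairsAux d (calcSquares d) fuel i (j - 1) (acc ++ [(i, j)])
                  = acc ++ [(i, j)] := by
                cases fuel with
                | zero => rfl
                | succ fuel' => rw [aPairsAux, if_neg (by omega : ¬ i ≤ j - 1)]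
              rw [hstop]
              have hnil : bPairsAux d (d + 1 - (i + 1)).toNat (i + 1) = [] := by
                apply bPairsAux_nil d _ (i + 1) (by omega)
                intro x b hx hxb hs
                by_contra hc
                push_neg at hc
                have h3 := (H x b hx hxb hs).mp (by omega)
                omega
              rw [hB, hnil]
      · rw [aPairsAux, if_neg hij]
        exact hnil_of_out hij

theorem pairs_eq (d : Int) : calcSquareSums d = bPairsAux d (d + 1).toNat 0 := by
  by_cases hd : 0 ≤ d
  · obtain ⟨hm0, hm1, hm2⟩ := pyIsqrt_spec d hd
    have hlen := calcSquaresAux_len d (pyIsqrt d) hm0 hm1 hm2 (d + 1).toNat 0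
      (by omega) (le_refl _) (by omega)
    have hq : ((calcSquares d).length : Int) - 1 = pyIsqrt d := by
      unfold calcSquares; rw [hlen]; ring
    have hflen : (calcSquares d).length = (pyIsqrt d + 1 - 0).toNat := by
      have : ((calcSquares d).length : Int) = pyIsqrt d + 1 - 0 := by omega
      omega
    show aPairsAux d (calcSquares d) (calcSquares d).length 0
        (((calcSquares d).length : Int) - 1) [] = bPairsAux d (d + 1).toNat 0
    rw [hq, hflen]
    have hH : ∀ a b : Int, 0 ≤ a → a ≤ b → a * a + b * b = d → (0 ≤ a ↔ b ≤ pyIsqrt d) := by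
      intro a b ha hab hs
      constructor
      · intro _
        nlinarith
      · intro _
        exact ha
    have := tp d (pyIsqrt d) hm0 hm1 (pyIsqrt d + 1 - 0).toNat 0 (pyIsqrt d) []
      (le_refl _) (le_refl _) (le_refl _) hH
    rw [this]
    simp only [List.nil_append]
    congr 1
    omega
  · have hz : (d + 1).toNat = 0 := by omega
    have hq : calcSquares d = [] := by
      unfold calcSquares; rw [hz]; rfl
    show aPairsAux d (calcSquares d) (calcSquares d).length 0
        (((calcSquares d).length : Int) - 1) [] = bPairsAux d (d + 1).toNat 0
    rw [hq, hz]
    rfl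

theorem inner_eq (fd : PySem.Dict (Int × Int) Int) (k : Int × Int) :
    ∀ (offsets : List (Int × Int)) (c : Int),
      offsets.foldl (fun count o =>
        match fd.get? (k.1 + o.1, k.2 + o.2) with
        | some v => count + v
        | none => count) c
      = offsets.foldl (fun count o => count + fd.getD (k.1 + o.1, k.2 + o.2) 0) c := by
  intro offsets
  induction offsets with
  | nil => intro c; rfl
  | cons o rest ih =>
    intro c
    simp only [List.foldl_cons, ih]
    congr 1
    cases h : fd.get? (k.1 + o.1, k.2 + o.2) with
    | none => simp [PySem.Dict.getD, h]
    | some v => simp [PySem.Dict.getD, h]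

theorem countLoop_eq (fd : PySem.Dict (Int × Int) Int) (offsets : List (Int × Int)) :
    countLoopA fd offsets = countLoopB fd offsets := by
  unfold countLoopA countLoopB
  generalize (PySem.Dict.keys fd) = ks
  induction ks using List.reverseRecOn with
  | nil => rfl
  | append_singleton rest k ih => simp [List.foldl_append, inner_eq]

theorem countLoopB_nil (fd : PySem.Dict (Int × Int) Int) : countLoopB fd [] = 0 := by
  unfold countLoopB
  generalize (PySem.Dict.keys fd) = ks
  induction ks with
  | nil => rfl
  | cons k rest ih => simpa using ih

-- ===== VERDICT (by name: the statement is the Claim_ definition above) =====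
theorem solve_spec : Claim_equal_solve := by
  intro d forest _
  show solve d forest = solve_alt d forest
  unfold solve solve_alt
  rw [show calcOffsets d = (bPairsAux d (d + 1).toNat 0).foldl expandPair [] from by
        unfold calcOffsets; rw [pairs_eq]]
  by_cases h : (bPairsAux d (d + 1).toNat 0).foldl expandPair [] = ([] : List (Int × Int))
  · rw [if_pos h, h]
    show 0 = PySem.Int.floordiv (countLoopB (buildForest forest) []) 2
    rw [countLoopB_nil]
    rfl
  · rw [if_neg h, countLoop_eq]
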